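-- pv_equiv track=rewrite | github.com/akplusgold/pycodehasher | pycodehasher.py | remove_all_elements_from_list
-- ===== SOURCE A (Python) =====
-- def remove_all_elements_from_list(l=[], element_l=[], \
--         starts_with_l=[], ends_with_l=[]):
--
--     _l = l
--
--     for item in element_l:
--         _l = [x for x in _l if x != item]
--
--     for item in starts_with_l:
--         _l = [x for x in _l if x.startswith(item) != True]
--
--     for item in ends_with_l:
--         _l = [x for x in _l if x.endswith(item) != True]
--
--     return _l
-- ===== SOURCE B (Python) =====
-- def remove_all_elements_from_list(l=[], element_l=[], \
--         starts_with_l=[], ends_with_l=[]):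
--     return [x for x in l
--             if x not in element_l
--             and not any(x.startswith(p) for p in starts_with_l)
--             and not any(x.endswith(s) for s in ends_with_l)]
-- ===== Notes on version B (the rewrite author's own statement) =====
-- stated objective: simpler
-- what changed: Replaces the k+m+n successive filtering passes (one full list rebuild per pattern) with a single comprehension over l whose predicate combines exact-match, prefix and suffix tests.
import Mathlib
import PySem

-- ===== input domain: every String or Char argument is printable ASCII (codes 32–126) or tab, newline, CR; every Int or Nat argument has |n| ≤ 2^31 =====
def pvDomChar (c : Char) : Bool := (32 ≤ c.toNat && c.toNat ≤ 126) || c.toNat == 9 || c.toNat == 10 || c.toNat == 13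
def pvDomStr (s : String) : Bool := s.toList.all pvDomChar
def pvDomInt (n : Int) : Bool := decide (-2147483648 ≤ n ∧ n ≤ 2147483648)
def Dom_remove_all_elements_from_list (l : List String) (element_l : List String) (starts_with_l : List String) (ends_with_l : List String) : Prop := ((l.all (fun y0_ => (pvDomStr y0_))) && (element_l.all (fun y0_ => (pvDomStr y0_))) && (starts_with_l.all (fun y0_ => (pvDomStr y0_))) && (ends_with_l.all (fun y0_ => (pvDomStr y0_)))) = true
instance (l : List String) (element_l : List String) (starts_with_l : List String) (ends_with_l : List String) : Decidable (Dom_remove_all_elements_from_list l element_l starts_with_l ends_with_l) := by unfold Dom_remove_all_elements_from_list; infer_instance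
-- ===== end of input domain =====

-- B replaces A's successive per-pattern filtering passes with a single traversal of l
-- using one combined exact/prefix/suffix predicate (objective: simpler).
-- ===== PORT A =====
def remove_all_elements_from_list (l : List String) (element_l : List String) (starts_with_l : List String) (ends_with_l : List String) : List String :=
  let _l := l
  let _l := element_l.foldl (fun acc item => acc.filter (fun x => x != item)) _l
  let _l := starts_with_l.foldl (fun acc item => acc.filter (fun x => PySem.Str.startswith x item != true)) _l
  let _l := ends_with_l.foldl (fun acc item => acc.filter (fun x => PySem.Str.endswith x item != true)) _l
  _l

-- ===== PORT B =====
def remove_all_elements_from_list_alt (l : List String) (element_l : List String) (starts_with_l : List String) (ends_with_l : List String) : List String :=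
  l.filter (fun x =>
    !(element_l.any (fun e => x == e))
    && !(starts_with_l.any (fun p => PySem.Str.startswith x p))
    && !(ends_with_l.any (fun s => PySem.Str.endswith x s)))

-- ===== PRECONDITION & SPEC =====
def Spec_remove_all_elements_from_list (l : List String) (element_l : List String) (starts_with_l : List String) (ends_with_l : List String) (out : List String) : Prop := out = remove_all_elements_from_list_alt l element_l starts_with_l ends_with_l
instance (l : List String) (element_l : List String) (starts_with_l : List String) (ends_with_l : List String) (out : List String) : Decidable (Spec_remove_all_elements_from_list l element_l starts_with_l ends_with_l out) := by unfold Spec_remove_all_elements_from_list; infer_instance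

-- ===== CLAIM =====
def Claim_equal_remove_all_elements_from_list : Prop := ∀ (l : List String) (element_l : List String) (starts_with_l : List String) (ends_with_l : List String), Dom_remove_all_elements_from_list l element_l starts_with_l ends_with_l → Spec_remove_all_elements_from_list l element_l starts_with_l ends_with_l (remove_all_elements_from_list l element_l starts_with_l ends_with_l)

-- ===== LEMMAS AND PROOFS =====
-- A cascade of filters equals one filter by the conjunction of all the predicates.
theorem foldl_filter {α β : Type} (f : β → α → Bool) (ps : List α) (l : List β) :
    ps.foldl (fun acc p => acc.filter (fun x => f x p)) l
      = l.filter (fun x => ps.all (fun p => f x p)) := by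
  induction ps generalizing l with
  | nil => simp
  | cons p ps ih => simp [List.foldl_cons, ih, List.filter_filter, Bool.and_comm]

-- ===== VERDICT =====
theorem remove_all_elements_from_list_spec : Claim_equal_remove_all_elements_from_list := by
  intro l el sw ew _
  unfold Spec_remove_all_elements_from_list
  simp only [remove_all_elements_from_list, remove_all_elements_from_list_alt,
    foldl_filter, List.filter_filter]
  apply List.filter_congr
  intro x _
  simp [List.all_eq_not_any_not, bne, Bool.and_comm, Bool.and_left_comm]
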